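-- pv_equiv track=rewrite | github.com/jachymb/compress | chunks.py | checkl
-- ===== SOURCE A (Python) =====
-- from itertools import zip_longest, count
--
-- def grouper(n, iterable, fillvalue=None):
--     args = [iter(iterable)] * n
--     return zip_longest(fillvalue=fillvalue, *args)
--
-- def checkl(data, l):
--     g = grouper(l, data, 0)
--     s = set()
--     #for i, ch in enumerate(g):
--     for ch in g:
--         if ch in s:
--             return False
--         s.add(ch)
--     return True
-- ===== SOURCE B (Python) =====
-- from itertools import zip_longest
--
-- def grouper(n, iterable, fillvalue=None):
--     args = [iter(iterable)] * n
--     return zip_longest(fillvalue=fillvalue, *args)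
--
-- def checkl(data, l):
--     chunks = sorted(grouper(l, data, 0))
--     return all(a != b for a, b in zip(chunks, chunks[1:]))
-- ===== Notes on version B (the rewrite author's own statement) =====
-- stated objective: alternative
-- what changed: checkl now sorts the chunk tuples and checks that no two adjacent sorted chunks are equal, replacing A's single pass with an incremental hash set, membership test and early return by a sort-then-adjacent-scan with no auxiliary set.
import Mathlib
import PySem

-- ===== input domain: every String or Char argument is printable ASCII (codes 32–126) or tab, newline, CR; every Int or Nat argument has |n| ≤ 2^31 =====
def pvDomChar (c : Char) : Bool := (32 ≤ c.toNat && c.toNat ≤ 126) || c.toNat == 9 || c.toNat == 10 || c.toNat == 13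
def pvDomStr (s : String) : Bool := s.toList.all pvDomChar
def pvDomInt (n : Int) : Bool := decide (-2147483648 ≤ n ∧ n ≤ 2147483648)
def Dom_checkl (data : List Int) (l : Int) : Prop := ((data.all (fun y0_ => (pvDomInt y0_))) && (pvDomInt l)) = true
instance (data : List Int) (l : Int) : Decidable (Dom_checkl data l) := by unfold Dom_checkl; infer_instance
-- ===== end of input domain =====

-- B replaces A's incremental hash-set pass (membership test + early return) by sorting the
-- chunk tuples and checking that no two adjacent sorted chunks are equal (sort-then-scan).

-- ===== PORT A =====
-- grouper(n, iterable, 0): chunks of size n, last one padded with 0; empty for n <= 0.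
-- Shared helper of both Pythons (B keeps grouper verbatim). Chunk tuples are ported as List Int.
def grouperGo (n : Nat) : List Int → List (List Int)
  | [] => []
  | x :: xs =>
      (List.take (n + 1) (x :: xs) ++ List.replicate ((n + 1) - (x :: xs).length) 0)
        :: grouperGo n (List.drop (n + 1) (x :: xs))
termination_by l => l.length
decreasing_by simp

def grouper (l : Int) (data : List Int) : List (List Int) :=
  if l ≤ 0 then [] else grouperGo (l.toNat - 1) data

-- the 'for ch in g' loop of A, with the growing set s and the early return False
def checklLoop (s : PySem.Set (List Int)) : List (List Int) → Bool
  | [] => true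
  | ch :: rest =>
      if PySem.Set.contains s ch then false else checklLoop (PySem.Set.add s ch) rest

def checkl (data : List Int) (l : Int) : Bool :=
  checklLoop PySem.Set.empty (grouper l data)

-- ===== PORT B =====
-- chunks = sorted(grouper(l, data, 0)); all(a != b for a, b in zip(chunks, chunks[1:]))
def checkl_alt (data : List Int) (l : Int) : Bool :=
  let chunks := @PySem.List.sorted (List Int) (List Int) List.instLinearOrder.toLT
    LinearOrder.toDecidableLT (grouper l data) (fun x => x) false
  (chunks.zip (chunks.drop 1)).all (fun p => p.1 != p.2)

-- ===== PRECONDITION & SPEC =====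
def Spec_checkl (data : List Int) (l : Int) (out : Bool) : Prop := out = checkl_alt data l
instance (data : List Int) (l : Int) (out : Bool) : Decidable (Spec_checkl data l out) := by unfold Spec_checkl; infer_instance

-- ===== CLAIM (what is proved, stated in full; the proofs are below) =====
def Claim_equal_checkl : Prop := ∀ (data : List Int) (l : Int), Dom_checkl data l → Spec_checkl data l (checkl data l)

-- ===== LEMMAS AND PROOFS =====
-- A's loop returns true iff the remaining chunks are distinct and disjoint from the seen set.
theorem checklLoop_true_iff (chunks : List (List Int)) :
    ∀ s : PySem.Set (List Int),
      checklLoop s chunks = true ↔ (chunks.Nodup ∧ ∀ c ∈ chunks, c ∉ s) := by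
  induction chunks with
  | nil => intro s; simp [checklLoop]
  | cons ch rest ih =>
      intro s
      simp only [checklLoop]
      by_cases h : PySem.Set.contains s ch
      · have hm : ch ∈ s := (PySem.Set.contains_iff s ch).mp h
        simp only [if_pos h]
        constructor
        · intro hF; cases hF
        · rintro ⟨-, hall⟩; exact absurd hm (hall ch (by simp))
      · have hns : ch ∉ s := fun hm => h ((PySem.Set.contains_iff s ch).mpr hm)
        rw [if_neg h, ih]
        simp only [List.nodup_cons, PySem.Set.mem_add, List.mem_cons]
        constructor
        · rintro ⟨hnd, hall⟩
          refine ⟨⟨fun hmem => (hall ch hmem) (Or.inr rfl), hnd⟩, ?_⟩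
          rintro c (rfl | hc)
          · exact hns
          · exact fun hcs => (hall c hc) (Or.inl hcs)
        · rintro ⟨⟨hch, hnd⟩, hall⟩
          refine ⟨hnd, fun c hc => ?_⟩
          rintro (hcs | rfl)
          · exact hall c (Or.inr hc) hcs
          · exact hch hc

-- the adjacent-pairs scan of B is exactly IsChain (· ≠ ·)
theorem adjAll_iff_chain (ys : List (List Int)) :
    ((ys.zip (ys.drop 1)).all (fun p => p.1 != p.2)) = true ↔ List.IsChain (· ≠ ·) ys := by
  induction ys with
  | nil => simp
  | cons a t ih =>
      cases t with
      | nil => simp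
      | cons b u =>
          rw [List.isChain_cons_cons, ← ih]
          simp

-- combining ≤-sortedness with adjacent distinctness gives adjacent strict increase
theorem isChain_lt_of_sorted_ne (ys : List (List Int))
    (hs : ys.Pairwise (· ≤ ·)) (hc : List.IsChain (· ≠ ·) ys) :
    List.IsChain (· < ·) ys := by
  induction ys with
  | nil => exact List.isChain_nil
  | cons a t ih =>
      cases t with
      | nil => simp
      | cons b u =>
          rw [List.isChain_cons_cons] at hc ⊢
          rw [List.pairwise_cons] at hs
          exact ⟨lt_of_le_of_ne (hs.1 b (by simp)) hc.1, ih hs.2 hc.2⟩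

-- on a ≤-sorted list, adjacent distinctness is Nodup
theorem chain_ne_iff_nodup (ys : List (List Int)) (hs : ys.Pairwise (· ≤ ·)) :
    List.IsChain (· ≠ ·) ys ↔ ys.Nodup := by
  constructor
  · intro hc
    have hlt := isChain_lt_of_sorted_ne ys hs hc
    exact (List.isChain_iff_pairwise.mp hlt).imp (fun h => ne_of_lt h)
  · intro hnd
    exact hnd.isChain

theorem checkl_eq_nodup (data : List Int) (l : Int) :
    checkl data l = decide ((grouper l data).Nodup) := by
  rw [Bool.eq_iff_iff, decide_eq_true_iff]
  unfold checkl
  rw [checklLoop_true_iff]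
  simp [PySem.Set.empty]

theorem checkl_alt_eq_nodup (data : List Int) (l : Int) :
    checkl_alt data l = decide ((grouper l data).Nodup) := by
  rw [Bool.eq_iff_iff, decide_eq_true_iff]
  unfold checkl_alt
  refine (adjAll_iff_chain _).trans ?_
  refine (chain_ne_iff_nodup _ (PySem.List.sorted_pairwise (grouper l data) (fun x => x))).trans ?_
  exact (@PySem.List.sorted_perm _ _ List.instLinearOrder.toLT LinearOrder.toDecidableLT (grouper l data) (fun x => x) false).nodup_iff

-- ===== VERDICT (by name: the statement is the Claim_ definition above) =====
theorem checkl_spec : Claim_equal_checkl := by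
  intro data l _
  unfold Spec_checkl
  rw [checkl_eq_nodup, checkl_alt_eq_nodup]
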